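-- pv_equiv track=rewrite | github.com/veryfansome/germ | bot/lang/controllers/english.py | extract_consecutive_token_patterns
-- ===== SOURCE A (Python) =====
-- def extract_consecutive_token_patterns(pos_tags, patterns):
--     """
--     Finds specified patterns within a list of POS tags.
--
--     :param pos_tags: List of POS tags (e.g., ['RB', ',', 'PRP', 'VBZ', ...])
--     :param patterns: List of lists, where each internal list is a series of POS tags representing a pattern
--                      to search for (e.g., [['DT', 'NN'], ['IN', 'DT', 'JJ']])
--     :return: Dictionary where keys are the string representation of the pattern and values are lists of
--              the indexes where the pattern was found in the pos_tags list.
--     """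
--     results = {}
--
--     for pattern in patterns:
--         pattern_length = len(pattern)
--         pattern_str = '-'.join(pattern)
--         results[pattern_str] = []
--
--         # Loop through the pos_tags list and try to match each pattern
--         for i in range(len(pos_tags) - pattern_length + 1):
--             if pos_tags[i:i + pattern_length] == pattern:
--                 # Append the starting index of the pattern match to the results
--                 results[pattern_str].append(i)
--     return results
-- ===== SOURCE B (Python) =====
-- def extract_consecutive_token_patterns(pos_tags, patterns):
--     # One pass builds an index tag -> ascending positions; each pattern then
--     # only probes the positions where its first tag occurs.
--     index = {}
--     for i, tag in enumerate(pos_tags):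
--         index.setdefault(tag, []).append(i)
--     results = {}
--     for pattern in patterns:
--         if pattern:
--             rest = pattern[1:]
--             m = len(rest)
--             hits = [i for i in index.get(pattern[0], [])
--                     if pos_tags[i + 1:i + 1 + m] == rest]
--         else:
--             hits = list(range(len(pos_tags) + 1))
--         results['-'.join(pattern)] = hits
--     return results
-- ===== Notes on version B (the rewrite author's own statement) =====
-- stated objective: alternative
-- what changed: Instead of scanning the whole tag list once per pattern, B builds a tag-to-positions index in one pass and checks each pattern only at the positions where its first tag occurs; it trades A's uniform per-pattern scan for index pruning that helps on diverse tags but not on constant ones.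
import Mathlib
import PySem

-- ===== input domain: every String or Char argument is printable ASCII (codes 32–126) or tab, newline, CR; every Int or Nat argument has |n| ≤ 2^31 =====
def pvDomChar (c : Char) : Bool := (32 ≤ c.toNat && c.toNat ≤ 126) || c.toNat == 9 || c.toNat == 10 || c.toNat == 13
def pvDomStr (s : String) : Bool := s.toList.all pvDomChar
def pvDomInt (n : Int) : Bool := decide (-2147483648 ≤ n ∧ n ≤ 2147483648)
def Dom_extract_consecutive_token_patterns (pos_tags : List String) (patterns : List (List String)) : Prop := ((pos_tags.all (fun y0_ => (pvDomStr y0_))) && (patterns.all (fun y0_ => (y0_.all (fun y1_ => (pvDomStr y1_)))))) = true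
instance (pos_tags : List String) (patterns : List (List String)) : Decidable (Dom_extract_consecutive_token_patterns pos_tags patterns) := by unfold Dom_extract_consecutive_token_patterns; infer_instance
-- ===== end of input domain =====

-- B replaces A's per-pattern scan of the whole tag list by a tag→positions index
-- built in one pass, probing only the positions of each pattern's first tag.

-- ===== PORT A =====
def extract_consecutive_token_patterns (pos_tags : List String) (patterns : List (List String)) : List (String × List Int) :=
  (patterns.foldl (fun results pattern =>
    let pattern_length : Int := pattern.length
    let pattern_str : String := PySem.Str.join "-" pattern
    let results := results.insert pattern_str ([] : List Int)
    (PySem.List.pyRange 0 ((pos_tags.length : Int) - pattern_length + 1) 1).foldl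
      (fun results i =>
        if PySem.List.slice pos_tags (some i) (some (i + pattern_length)) == pattern
        then results.modify pattern_str [] (· ++ [i])
        else results)
      results)
    (PySem.Dict.empty : PySem.Dict String (List Int))).items

-- ===== PORT B =====
def extract_consecutive_token_patterns_alt (pos_tags : List String) (patterns : List (List String)) : List (String × List Int) :=
  let index : PySem.Dict String (List Int) :=
    (PySem.List.enumerate pos_tags 0).foldl
      (fun d p => d.modify p.2 [] (· ++ [p.1])) PySem.Dict.empty
  (patterns.foldl (fun results pattern =>
    let hits : List Int :=
      match pattern with
      | [] => PySem.List.pyRange 0 ((pos_tags.length : Int) + 1) 1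
      | t :: rest =>
        (index.getD t []).filter (fun i =>
          PySem.List.slice pos_tags (some (i + 1)) (some (i + 1 + (rest.length : Int))) == rest)
    results.insert (PySem.Str.join "-" pattern) hits)
    (PySem.Dict.empty : PySem.Dict String (List Int))).items

-- ===== PRECONDITION & SPEC =====
def Spec_extract_consecutive_token_patterns (pos_tags : List String) (patterns : List (List String)) (out : List (String × List Int)) : Prop := out = extract_consecutive_token_patterns_alt pos_tags patterns
instance (pos_tags : List String) (patterns : List (List String)) (out : List (String × List Int)) : Decidable (Spec_extract_consecutive_token_patterns pos_tags patterns out) := by unfold Spec_extract_consecutive_token_patterns; infer_instance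

-- ===== CLAIM (what is proved, stated in full; the proofs are below) =====
def Claim_equal_extract_consecutive_token_patterns : Prop := ∀ (pos_tags : List String) (patterns : List (List String)), Dom_extract_consecutive_token_patterns pos_tags patterns → Spec_extract_consecutive_token_patterns pos_tags patterns (extract_consecutive_token_patterns pos_tags patterns)

-- ===== LEMMAS AND PROOFS =====

-- matches of one pattern, as A's inner loop computes them
def pvHitsA (pos_tags : List String) (pattern : List String) : List Int :=
  (PySem.List.pyRange 0 ((pos_tags.length : Int) - (pattern.length : Int) + 1) 1).filter
    (fun i => PySem.List.slice pos_tags (some i) (some (i + (pattern.length : Int))) == pattern)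

-- the empty pattern matches at every index 0..len
theorem pv_hits_nil (pos_tags : List String) :
    pvHitsA pos_tags [] = PySem.List.pyRange 0 ((pos_tags.length : Int) + 1) 1 := by
  unfold pvHitsA
  simp only [List.length_nil, Nat.cast_zero, sub_zero, add_zero]
  rw [List.filter_eq_self]
  intro i hi
  have h0 : (0:Int) ≤ i := (PySem.List.mem_pyRange_one.1 hi).1
  rw [PySem.List.slice_toNat pos_tags h0 h0]
  simp

-- B's index lists, for each tag, its positions in ascending order
theorem pv_index_getD (pos_tags : List String) (t : String) :
    (((PySem.List.enumerate pos_tags 0).foldl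
      (fun d p => d.modify p.2 [] (· ++ [p.1])) (PySem.Dict.empty : PySem.Dict String (List Int))).getD t [])
    = (PySem.List.pyRange 0 (pos_tags.length : Int) 1).filter (fun i => PySem.List.pyGetD pos_tags i "" == t) := by
  have h1 : (PySem.List.enumerate pos_tags 0).foldl
      (fun d p => d.modify p.2 [] (· ++ [p.1])) (PySem.Dict.empty : PySem.Dict String (List Int))
      = ((PySem.List.enumerate pos_tags 0).map (fun p => (p.2, p.1))).foldl
      (fun d p => d.modify p.1 [] (· ++ [p.2])) PySem.Dict.empty := by
    rw [List.foldl_map]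
  rw [h1, PySem.Dict.getD_foldl_modify_append, PySem.Dict.getD_empty]
  rw [PySem.List.enumerate_eq_map_pyRange (d := "")]
  simp [List.map_map, List.filter_map, Function.comp_def]

-- a full-slice match at an in-range index splits into head match + tail-slice match
theorem pv_slice_cons (pos_tags : List String) (t : String) (rest : List String)
    (i : Int) (h0 : 0 ≤ i) (hn : i < (pos_tags.length : Int)) :
    (PySem.List.slice pos_tags (some i) (some (i + ((rest.length : Int) + 1))) == t :: rest)
      = (PySem.List.pyGetD pos_tags i "" == t &&
         PySem.List.slice pos_tags (some (i + 1)) (some (i + 1 + (rest.length : Int))) == rest) := by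
  have hj : i.toNat < pos_tags.length := by omega
  rw [PySem.List.slice_toNat pos_tags h0 (by omega), PySem.List.slice_toNat pos_tags (by omega) (by omega)]
  have e1 : (i + ((rest.length : Int) + 1)).toNat - i.toNat = rest.length + 1 := by omega
  have e2 : (i + 1 + (rest.length : Int)).toNat - (i + 1).toNat = rest.length := by omega
  have e3 : (i + 1).toNat = i.toNat + 1 := by omega
  rw [e1, e2, e3, List.drop_eq_getElem_cons hj, List.take_succ_cons,
    PySem.List.pyGetD_eq_getElem pos_tags "" h0 hn]
  apply Bool.eq_iff_iff.mpr
  simp [beq_iff_eq]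

-- past the last feasible start, the slice is too short to match a nonempty pattern
theorem pv_slice_short (pos_tags : List String) (t : String) (rest : List String)
    (i : Int) (h0 : 0 ≤ i) (hn : (pos_tags.length : Int) - ((rest.length : Int) + 1) < i) :
    (PySem.List.slice pos_tags (some i) (some (i + ((rest.length : Int) + 1))) == t :: rest) = false := by
  rw [PySem.List.slice_toNat pos_tags h0 (by omega)]
  apply Bool.eq_false_iff.mpr
  intro hcontra
  have heq := (beq_iff_eq).1 hcontra
  have hlen := congrArg List.length heq
  simp [List.length_take, List.length_drop] at hlen
  omega

-- A's matches of a nonempty pattern = B's filter of the first-tag positions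
theorem pv_hits_eq (pos_tags : List String) (t : String) (rest : List String) :
    pvHitsA pos_tags (t :: rest)
      = ((PySem.List.pyRange 0 (pos_tags.length : Int) 1).filter
          (fun i => PySem.List.pyGetD pos_tags i "" == t)).filter
          (fun i => PySem.List.slice pos_tags (some (i + 1)) (some (i + 1 + (rest.length : Int))) == rest) := by
  unfold pvHitsA
  rw [List.filter_filter]
  have hlen : (((t :: rest).length : Int)) = (rest.length : Int) + 1 := by
    simp
  rw [hlen]
  set n : Int := (pos_tags.length : Int) with hn
  set m : Int := (rest.length : Int) with hm
  have hm0 : 0 ≤ m := by positivity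
  have hmain : (PySem.List.pyRange 0 (n - (m+1) + 1) 1).filter
      (fun i => PySem.List.slice pos_tags (some i) (some (i + (m+1))) == t :: rest)
      = (PySem.List.pyRange 0 n 1).filter
      (fun i => PySem.List.slice pos_tags (some i) (some (i + (m+1))) == t :: rest) := by
    by_cases hb : n - (m+1) + 1 ≤ 0
    · rw [PySem.List.pyRange_one_eq_nil hb]
      simp only [List.filter_nil]
      symm
      rw [List.filter_eq_nil_iff]
      intro i hi
      have hmem := PySem.List.mem_pyRange_one.1 hi
      have hf := pv_slice_short pos_tags t rest i (by omega) (by omega)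
      simpa [beq_eq_false_iff_ne] using hf
    · rw [PySem.List.pyRange_one_append 0 (n - (m+1) + 1) n (by omega) (by omega),
        List.filter_append]
      have hnil : (PySem.List.pyRange (n - (m+1) + 1) n 1).filter
          (fun i => PySem.List.slice pos_tags (some i) (some (i + (m+1))) == t :: rest) = [] := by
        rw [List.filter_eq_nil_iff]
        intro i hi
        have hmem := PySem.List.mem_pyRange_one.1 hi
        have hf := pv_slice_short pos_tags t rest i (by omega) (by omega)
        simpa [beq_eq_false_iff_ne] using hf
      rw [hnil, List.append_nil]
  rw [hmain]
  apply List.filter_congr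
  intro i hi
  have hmem := PySem.List.mem_pyRange_one.1 hi
  rw [pv_slice_cons pos_tags t rest i (by omega) (by omega)]
  rw [Bool.and_comm]

-- A's inner loop, started on a dict whose key k holds v, appends the matching
-- indices to v (it only ever touches key k)
theorem pv_inner_loop (l : List Int) (c : Int → Bool)
    (d : PySem.Dict String (List Int)) (k : String) (v : List Int) :
    l.foldl (fun r i => if c i then r.modify k [] (· ++ [i]) else r) (d.insert k v)
      = d.insert k (v ++ l.filter c) := by
  induction l generalizing v with
  | nil => simp
  | cons i l ih =>
    by_cases h : c i
    · have hmod : (d.insert k v).modify k [] (· ++ [i]) = d.insert k (v ++ [i]) := by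
        show (d.insert k v).insert k (((d.insert k v).getD k []) ++ [i]) = _
        rw [PySem.Dict.getD_insert_self, PySem.Dict.insert_insert_self]
      simp [h, hmod, ih]
    · simp [h, ih]

-- the two pattern loops build identical dicts from any start
theorem pv_fold_eq (pos_tags : List String) (patterns : List (List String))
    (d : PySem.Dict String (List Int)) :
    patterns.foldl (fun results pattern =>
      let pattern_length : Int := pattern.length
      let pattern_str : String := PySem.Str.join "-" pattern
      let results := results.insert pattern_str ([] : List Int)
      (PySem.List.pyRange 0 ((pos_tags.length : Int) - pattern_length + 1) 1).foldl
        (fun results i =>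
          if PySem.List.slice pos_tags (some i) (some (i + pattern_length)) == pattern
          then results.modify pattern_str [] (· ++ [i]) else results) results) d
    = patterns.foldl (fun results pattern =>
      let hits : List Int := match pattern with
        | [] => PySem.List.pyRange 0 ((pos_tags.length : Int) + 1) 1
        | t :: rest =>
          ((((PySem.List.enumerate pos_tags 0).foldl
            (fun d p => d.modify p.2 [] (· ++ [p.1])) PySem.Dict.empty : PySem.Dict String (List Int)).getD t []).filter
            (fun i => PySem.List.slice pos_tags (some (i+1)) (some (i+1+(rest.length:Int))) == rest))
      results.insert (PySem.Str.join "-" pattern) hits) d := by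
  induction patterns generalizing d with
  | nil => rfl
  | cons p ps ih =>
    simp only [List.foldl_cons]
    rw [pv_inner_loop, List.nil_append, ih]
    congr 2
    cases p with
    | nil =>
      show pvHitsA pos_tags [] = _
      rw [pv_hits_nil]
    | cons t rest =>
      show pvHitsA pos_tags (t :: rest) = _
      rw [pv_hits_eq, ← pv_index_getD]

-- ===== VERDICT (by name: the statement is the Claim_ definition above) =====
theorem extract_consecutive_token_patterns_spec : Claim_equal_extract_consecutive_token_patterns := by
  intro pos_tags patterns _
  show extract_consecutive_token_patterns pos_tags patterns
      = extract_consecutive_token_patterns_alt pos_tags patterns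
  exact congrArg PySem.Dict.items (pv_fold_eq pos_tags patterns PySem.Dict.empty)
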